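-- pv_equiv track=rewrite | github.com/lys5588/NormCode-Psylens | resources/documentation/current/4_compilation/examples/pf.ncd/regenerate_flow_index.py | calculate_flow_indices_v2
-- ===== SOURCE A (Python) =====
-- from typing import List, Tuple, Optional
--
-- def count_leading_spaces(line: str) -> int:
--     """Count leading spaces in a line."""
--     return len(line) - len(line.lstrip())
--
-- def is_inference_line(line: str) -> bool:
--     """Check if line is an inference line (<-, <=, <*, :<:, :>:)."""
--     stripped = line.lstrip()
--     # Standard inference markers
--     if stripped.startswith('<-') or stripped.startswith('<=') or stripped.startswith('<*'):
--         return True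
--     # Root concept and ground markers
--     if stripped.startswith(':<:') or stripped.startswith(':>:'):
--         return True
--     return False
--
-- def calculate_flow_indices_v2(lines: List[str], base_index: str = "1") -> dict:
--     """
--     Calculate flow indices using indentation-based hierarchy.
--
--     NormCode flow index pattern:
--     - Root concept: 1
--     - Direct children of root: 1.1, 1.2, 1.3, ...
--     - Children of 1.1: 1.1.1, 1.1.2, ...
--     - Siblings are counted sequentially at each depth
--
--     Args:
--         lines: All lines of the file
--         base_index: Starting index (default "1")
--
--     Returns:
--         Dict mapping line_index to flow_index
--     """
--     flow_indices = {}
--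
--     # Find all inference lines first
--     inference_lines = []
--     for i, line in enumerate(lines):
--         if line.strip() and is_inference_line(line):
--             indent = count_leading_spaces(line)
--             inference_lines.append((i, indent, line))
--
--     if not inference_lines:
--         return flow_indices
--
--     # Find the minimum indent (root level)
--     min_indent = min(il[1] for il in inference_lines)
--
--     # Stack: [(indent, flow_index, child_count)]
--     # child_count is how many children have been assigned under this node
--     stack = []
--
--     for line_idx, indent, line in inference_lines:
--         if indent == min_indent:
--             # Root level - always use base_index
--             current_index = base_index
--             # Clear stack and start fresh with root
--             stack = [(indent, current_index, 0)]
--         else: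
--             # Pop stack until we find a parent (strictly lower indent)
--             while stack and stack[-1][0] >= indent:
--                 stack.pop()
--
--             if not stack:
--                 # Shouldn't happen if min_indent is correct, but fallback
--                 current_index = base_index
--                 stack.append((indent, current_index, 0))
--             else:
--                 # Child of the top of stack
--                 parent_indent, parent_index, child_count = stack[-1]
--                 child_count += 1
--                 current_index = f"{parent_index}.{child_count}"
--
--                 # Update parent's child count
--                 stack[-1] = (parent_indent, parent_index, child_count)
--
--                 # Push current as potential parent for deeper children
--                 stack.append((indent, current_index, 0))
--
--         flow_indices[line_idx] = current_index
--
--     return flow_indices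
-- ===== SOURCE B (Python) =====
-- def count_leading_spaces(line: str) -> int:
--     """Count leading spaces in a line."""
--     return len(line) - len(line.lstrip())
--
-- def is_inference_line(line: str) -> bool:
--     """Check if line is an inference line (<-, <=, <*, :<:, :>:)."""
--     stripped = line.lstrip()
--     if stripped.startswith('<-') or stripped.startswith('<=') or stripped.startswith('<*'):
--         return True
--     if stripped.startswith(':<:') or stripped.startswith(':>:'):
--         return True
--     return False
--
-- def calculate_flow_indices_v2(lines, base_index="1"):
--     # Pass 1: collect (line_idx, indent) for inference lines and link each one
--     # to its parent = nearest preceding entry with strictly smaller indent.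
--     entries = [(i, count_leading_spaces(line))
--                for i, line in enumerate(lines)
--                if line.strip() and is_inference_line(line)]
--     n = len(entries)
--     parents = []
--     for j in range(n):
--         p = next((q for q in range(j - 1, -1, -1) if entries[q][1] < entries[j][1]), -1)
--         parents.append(p)
--     # Pass 2: label in line order; the k-th child of a node labelled L gets "L.k",
--     # parentless entries get base_index.
--     labels = []
--     counts = [0] * n
--     out = {}
--     for j in range(n):
--         p = parents[j]
--         if p < 0:
--             lab = base_index
--         else:
--             counts[p] += 1
--             lab = f"{labels[p]}.{counts[p]}"
--         labels.append(lab)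
--         out[entries[j][0]] = lab
--     return out
-- ===== Notes on version B (the rewrite author's own statement) =====
-- stated objective: alternative
-- what changed: Replaces the single-pass monotonic stack with min-indent resets by two stackless passes: pass 1 links each inference line to the nearest preceding inference line with strictly smaller indent (its parent), pass 2 assigns labels in line order from per-parent child counters.
import Mathlib
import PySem

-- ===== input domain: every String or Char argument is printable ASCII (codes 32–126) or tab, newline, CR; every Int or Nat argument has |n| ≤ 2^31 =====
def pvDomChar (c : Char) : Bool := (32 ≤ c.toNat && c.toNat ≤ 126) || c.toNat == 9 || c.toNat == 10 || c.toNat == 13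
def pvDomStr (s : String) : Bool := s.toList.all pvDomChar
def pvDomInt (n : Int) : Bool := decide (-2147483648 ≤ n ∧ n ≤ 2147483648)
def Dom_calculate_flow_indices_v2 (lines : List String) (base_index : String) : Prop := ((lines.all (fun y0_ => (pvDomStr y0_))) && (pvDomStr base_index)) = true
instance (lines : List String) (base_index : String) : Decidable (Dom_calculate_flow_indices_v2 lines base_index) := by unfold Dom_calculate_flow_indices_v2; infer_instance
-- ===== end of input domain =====

-- B replaces A's single-pass monotonic-stack labelling by two stackless passes
-- (nearest-preceding-smaller-indent parent links, then per-parent child counters);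
-- objective: alternative decomposition, same exact return value.

-- ===== PORT A =====
-- shared module helpers
def count_leading_spaces (line : String) : Int :=
  PySem.Str.len line - PySem.Str.len (PySem.Str.lstrip line)

def is_inference_line (line : String) : Bool :=
  let stripped := PySem.Str.lstrip line
  if PySem.Str.startswith stripped "<-" || PySem.Str.startswith stripped "<=" || PySem.Str.startswith stripped "<*" then
    true
  else if PySem.Str.startswith stripped ":<:" || PySem.Str.startswith stripped ":>:" then
    true
  else
    false

-- A: 'inference_lines' collection loop (i, indent, line)
def pvLinesA (lines : List String) : List (Int × Int × String) :=
  (PySem.List.enumerate lines 0).foldl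
    (fun acc p =>
      if (PySem.Str.strip p.2 != "") && is_inference_line p.2 then
        acc ++ [(p.1, count_leading_spaces p.2, p.2)]
      else acc) []

-- A: body of 'for line_idx, indent, line in inference_lines'; stack head = Python stack top
def pvStepA (base_index : String) (min_indent : Int)
    (st : PySem.Dict Int String × List (Int × String × Int)) (e : Int × Int × String) :
    PySem.Dict Int String × List (Int × String × Int) :=
  let indent := e.2.1
  if indent = min_indent then
    (st.1.insert e.1 base_index, [(indent, base_index, 0)])
  else
    -- 'while stack and stack[-1][0] >= indent: stack.pop()'
    match st.2.dropWhile (fun t => decide (indent ≤ t.1)) with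
    | [] => (st.1.insert e.1 base_index, [(indent, base_index, 0)])
    | (pi, plab, c) :: rest =>
      let c' := c + 1
      let lab := plab ++ "." ++ PySem.Int.toStr c'
      (st.1.insert e.1 lab, (indent, lab, 0) :: (pi, plab, c') :: rest)

def calculate_flow_indices_v2 (lines : List String) (base_index : String) : List (Int × String) :=
  let inference_lines := pvLinesA lines
  if inference_lines.isEmpty then [] else
  let min_indent := (PySem.List.min? (inference_lines.map (fun il => il.2.1)) (fun x => x)).getD 0
  ((inference_lines.foldl (pvStepA base_index min_indent) (PySem.Dict.empty, [])).1).items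

-- ===== PORT B =====
-- B: entries = [(i, indent)] comprehension
def pvEntriesB (lines : List String) : List (Int × Int) :=
  (PySem.List.enumerate lines 0).foldl
    (fun acc p =>
      if (PySem.Str.strip p.2 != "") && is_inference_line p.2 then
        acc ++ [(p.1, count_leading_spaces p.2)]
      else acc) []

-- B: parent of entry j = next((q for q in range(j-1,-1,-1) if entries[q][1] < entries[j][1]), -1)
def pvParent (entries : List (Int × Int)) (j : Nat) : Int :=
  match (List.range j).reverse.find?
      (fun q => decide ((entries.getD q (0, 0)).2 < (entries.getD j (0, 0)).2)) with
  | some q => (q : Int)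
  | none => -1

-- B: body of pass 2; state = (labels, counts, out)
def pvStepB (base_index : String) (entries : List (Int × Int)) (parents : List Int)
    (st : List String × List Int × PySem.Dict Int String) (j : Nat) :
    List String × List Int × PySem.Dict Int String :=
  let p := parents.getD j (-1)
  if p < 0 then
    (st.1 ++ [base_index], st.2.1, st.2.2.insert (entries.getD j (0, 0)).1 base_index)
  else
    let c := st.2.1.getD p.toNat 0 + 1
    let counts' := st.2.1.set p.toNat c
    let lab := st.1.getD p.toNat "" ++ "." ++ PySem.Int.toStr c
    (st.1 ++ [lab], counts', st.2.2.insert (entries.getD j (0, 0)).1 lab)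

def calculate_flow_indices_v2_alt (lines : List String) (base_index : String) : List (Int × String) :=
  let entries := pvEntriesB lines
  let n := entries.length
  let parents := (List.range n).map (pvParent entries)
  (((List.range n).foldl (pvStepB base_index entries parents)
      ([], List.replicate n 0, PySem.Dict.empty)).2.2).items

-- ===== PRECONDITION & SPEC =====
def Spec_calculate_flow_indices_v2 (lines : List String) (base_index : String) (out : List (Int × String)) : Prop := out = calculate_flow_indices_v2_alt lines base_index
instance (lines : List String) (base_index : String) (out : List (Int × String)) : Decidable (Spec_calculate_flow_indices_v2 lines base_index out) := by unfold Spec_calculate_flow_indices_v2; infer_instance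

-- ===== CLAIM (what is proved, stated in full; the proofs are below) =====
def Claim_equal_calculate_flow_indices_v2 : Prop := ∀ (lines : List String) (base_index : String), Dom_calculate_flow_indices_v2 lines base_index → Spec_calculate_flow_indices_v2 lines base_index (calculate_flow_indices_v2 lines base_index)

-- ===== LEMMAS AND PROOFS =====

-- indent of entry q of A's inference-line list
def pvInd (full : List (Int × Int × String)) (q : Nat) : Int :=
  (full.getD q ((0 : Int), (0 : Int), "")).2.1

-- the projection relating B's entries to A's inference lines
def pvPr (t : Int × Int × String) : Int × Int := (t.1, t.2.1)

lemma pvEntries_eq_aux (l : List (Int × String)) :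
    ∀ acc : List (Int × Int × String),
      l.foldl (fun acc p =>
        if (PySem.Str.strip p.2 != "") && is_inference_line p.2 then
          acc ++ [(p.1, count_leading_spaces p.2)] else acc) (acc.map pvPr)
      = (l.foldl (fun acc p =>
          if (PySem.Str.strip p.2 != "") && is_inference_line p.2 then
            acc ++ [(p.1, count_leading_spaces p.2, p.2)] else acc) acc).map pvPr := by
  induction l with
  | nil => intro acc; simp
  | cons p l ih =>
    intro acc
    simp only [List.foldl_cons]
    by_cases h : ((PySem.Str.strip p.2 != "") && is_inference_line p.2) = true
    · rw [if_pos h, if_pos h, ← ih (acc ++ [(p.1, count_leading_spaces p.2, p.2)])]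
      simp [pvPr]
    · rw [if_neg h, if_neg h, ih]

lemma pvEntries_eq (lines : List String) : pvEntriesB lines = (pvLinesA lines).map pvPr := by
  unfold pvEntriesB pvLinesA
  simpa using pvEntries_eq_aux (PySem.List.enumerate lines 0) []

-- "spine coverage": consecutive stack positions dominate the gap between them,
-- and the bottom dominates everything below it
def pvCov (d : Nat → Int) : List Nat → Prop
  | [] => True
  | [b] => ∀ r, r < b → d b ≤ d r
  | a :: b :: t => b < a ∧ d b < d a ∧ (∀ r, b < r → r < a → d a ≤ d r) ∧ pvCov d (b :: t)

lemma pvCov_tail (d : Nat → Int) (x : Nat) (l : List Nat) (h : pvCov d (x :: l)) : pvCov d l := by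
  cases l with
  | nil => trivial
  | cons b t => exact h.2.2.2

lemma pvCov_dropWhile (d : Nat → Int) (p : Nat → Bool) :
    ∀ l, pvCov d l → pvCov d (l.dropWhile p) := by
  intro l
  induction l with
  | nil => intro _; simpa using trivial
  | cons x t ih =>
    intro h
    rw [List.dropWhile_cons]
    split
    · exact ih (pvCov_tail d x t h)
    · exact h

lemma pvCov_pairwise (d : Nat → Int) : ∀ l, pvCov d l → l.Pairwise (fun a b => b < a) := by
  intro l
  induction l with
  | nil => intro _; exact List.Pairwise.nil
  | cons a t ih =>
    intro h
    cases t with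
    | nil => simp
    | cons b t' =>
      have hpw := ih h.2.2.2
      refine List.Pairwise.cons ?_ hpw
      intro x hx
      rcases List.mem_cons.mp hx with rfl | hx
      · exact h.1
      · have := (List.pairwise_cons.mp hpw).1 x hx
        exact this.trans h.1

lemma pvCov_dominate (d : Nat → Int) :
    ∀ l, pvCov d l → ∀ hd, l.head? = some hd → ∀ r, r ≤ hd →
      ∃ a ∈ l, r ≤ a ∧ d a ≤ d r := by
  intro l
  induction l with
  | nil => intro _ hd h; simp at h
  | cons a t ih =>
    intro hcov hd hhd r hr
    simp only [List.head?_cons, Option.some.injEq] at hhd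
    subst hhd
    rcases eq_or_lt_of_le hr with rfl | hlt
    · exact ⟨r, List.mem_cons_self, le_refl r, le_refl (d r)⟩
    · cases t with
      | nil =>
        exact ⟨a, List.mem_cons_self, le_of_lt hlt, hcov r hlt⟩
      | cons b t' =>
        by_cases hb : r ≤ b
        · obtain ⟨x, hx, h1, h2⟩ := ih hcov.2.2.2 b rfl r hb
          exact ⟨x, List.mem_cons_of_mem a hx, h1, h2⟩
        · rw [not_le] at hb
          exact ⟨a, List.mem_cons_self, le_of_lt hlt, hcov.2.2.1 r hb hlt⟩

lemma pvFind_revRange_none (P : Nat → Bool) (j : Nat)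
    (h : ∀ r, r < j → P r = false) : (List.range j).reverse.find? P = none := by
  rw [List.find?_eq_none]
  intro x hx
  simp only [List.mem_reverse, List.mem_range] at hx
  simp [h x hx]

lemma pvFind_revRange_some (P : Nat → Bool) :
    ∀ j q, q < j → P q = true → (∀ r, q < r → r < j → P r = false) →
      (List.range j).reverse.find? P = some q := by
  intro j
  induction j with
  | zero => intro q hq; omega
  | succ j ih =>
    intro q hq hPq hrest
    have hrev : (List.range (j + 1)).reverse = j :: (List.range j).reverse := by
      rw [List.range_succ, List.reverse_append]; simp
    rw [hrev, List.find?_cons]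
    by_cases hqj : q = j
    · subst hqj; simp [hPq]
    · have hqlt : q < j := by omega
      have : P j = false := hrest j hqlt (by omega)
      simp only [this]
      exact ih q hqlt hPq (fun r h1 h2 => hrest r h1 (by omega))

-- the first element surviving a dropWhile fails the predicate
lemma pvDropWhile_head_false {α : Type} (p : α → Bool) :
    ∀ (l : List α) (x : α) (xs : List α), l.dropWhile p = x :: xs → p x = false := by
  intro l
  induction l with
  | nil => intro x xs h; simp at h
  | cons a t ih =>
    intro x xs h
    rw [List.dropWhile_cons] at h
    by_cases hpa : p a = true
    · rw [if_pos hpa] at h; exact ih x xs h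
    · rw [if_neg hpa] at h
      cases h
      simpa using hpa

-- the stack element recorded for position q, expressed via B's labels/counts lists
def pvNode (d : Nat → Int) (labels : List String) (counts : List Int) (q : Nat) :
    Int × String × Int := (d q, labels.getD q "", counts.getD q 0)

-- the simulation invariant after j entries have been processed
def pvInv (d : Nat → Int) (n j : Nat)
    (stA : PySem.Dict Int String × List (Int × String × Int))
    (stB : List String × List Int × PySem.Dict Int String) : Prop :=
  stA.1 = stB.2.2 ∧ stB.1.length = j ∧ stB.2.1.length = n ∧
  (∀ r, j ≤ r → stB.2.1.getD r 0 = 0) ∧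
  ∃ qs : List Nat,
    stA.2 = qs.map (pvNode d stB.1 stB.2.1) ∧
    qs.head? = (if j = 0 then none else some (j - 1)) ∧
    pvCov d qs ∧ (∀ x ∈ qs, x < j)

-- getD composites used by the simulation step
lemma pvGetD_set_ne (l : List Int) (i j : Nat) (v : Int) (h : i ≠ j) :
    (l.set i v).getD j 0 = l.getD j 0 := by
  simp [List.getD_eq_getElem?_getD, List.getElem?_set_ne h]

lemma pvGetD_set_self (l : List Int) (i : Nat) (v : Int) (h : i < l.length) :
    (l.set i v).getD i 0 = v := by
  simp [List.getD_eq_getElem?_getD, List.getElem?_set_self h]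

lemma pvGetD_concat_len (l : List String) (x : String) : (l ++ [x]).getD l.length "" = x := by
  simp [List.getD_eq_getElem?_getD]

lemma pvGetD_append_left (l : List String) (x : String) (i : Nat) (h : i < l.length) :
    (l ++ [x]).getD i "" = l.getD i "" := List.getD_append _ _ _ _ h

lemma pvMain (full : List (Int × Int × String)) (base_index : String) (m : Int)
    (Hmin : ∀ e ∈ full, m ≤ e.2.1) :
    ∀ (k j : Nat), j + k = full.length →
    ∀ stA stB, pvInv (pvInd full) full.length j stA stB →
    (List.foldl (pvStepA base_index m) stA (full.drop j)).1 =
    ((List.range' j k).foldl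
        (pvStepB base_index (full.map pvPr)
          ((List.range full.length).map (pvParent (full.map pvPr)))) stB).2.2 := by
  intro k
  induction k with
  | zero =>
    intro j hjk stA stB hInv
    rw [List.drop_eq_nil_of_le (by omega)]
    simpa using hInv.1
  | succ k ih =>
    intro j hjk stA stB hInv
    have hjn : j < full.length := by omega
    rw [List.drop_eq_getElem_cons hjn, List.range'_succ, List.foldl_cons, List.foldl_cons]
    refine ih (j+1) (by omega) _ _ ?_
    obtain ⟨hout, hlabLen, hcntLen, hzero, qs, hstack, hhead, hcov, hqslt⟩ := hInv
    have hdr : ∀ r, ∀ hr : r < full.length, pvInd full r = full[r].2.1 := by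
      intro r hr; unfold pvInd; rw [List.getD_eq_getElem _ _ hr]
    have hEget : ∀ r, ∀ hr : r < full.length, (full.map pvPr).getD r (0, 0) = pvPr full[r] := by
      intro r hr
      rw [List.getD_eq_getElem _ _ (by simpa using hr)]
      simp
    have hPar : ((List.range full.length).map (pvParent (full.map pvPr))).getD j (-1)
        = pvParent (full.map pvPr) j := by
      rw [List.getD_eq_getElem _ _ (by simpa using hjn)]
      simp
    have hmlb : ∀ r, ∀ hr : r < full.length, m ≤ pvInd full r := by
      intro r hr; rw [hdr r hr]; exact Hmin _ (List.getElem_mem hr)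
    -- B's step when no parent exists
    have hBroot : (∀ r, r < j → ¬ (pvInd full r < pvInd full j)) →
        pvStepB base_index (full.map pvPr)
            ((List.range full.length).map (pvParent (full.map pvPr))) stB j
          = (stB.1 ++ [base_index], stB.2.1, stB.2.2.insert full[j].1 base_index) := by
      intro hall
      have hfind : pvParent (full.map pvPr) j = -1 := by
        unfold pvParent
        rw [pvFind_revRange_none]
        intro r hr
        rw [decide_eq_false_iff_not, hEget r (by omega), hEget j hjn]
        show ¬ (full[r].2.1 < full[j].2.1)
        rw [← hdr r (by omega), ← hdr j hjn]
        exact hall r hr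
      unfold pvStepB
      rw [hPar, hfind, if_pos (by norm_num), hEget j hjn]
      rfl
    -- the root-reset invariant (A resets the stack to [current], B appends base_index)
    have hrootInv : (∀ r, r < j → pvInd full j ≤ pvInd full r) →
        pvInv (pvInd full) full.length (j+1)
          (stA.1.insert full[j].1 base_index, [(full[j].2.1, base_index, 0)])
          (stB.1 ++ [base_index], stB.2.1, stB.2.2.insert full[j].1 base_index) := by
      intro hall
      refine ⟨by rw [hout], by simp [hlabLen], hcntLen,
        fun r hr => hzero r (by omega), [j], ?_, by simp, ?_, by simp⟩
      · simp only [List.map_cons, List.map_nil, pvNode, List.cons.injEq, Prod.mk.injEq, and_true]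
        refine ⟨(hdr j hjn).symm, ?_, (hzero j le_rfl).symm⟩
        rw [← hlabLen, pvGetD_concat_len]
      · show pvCov (pvInd full) [j]
        exact hall
    by_cases hm : full[j].2.1 = m
    · -- A's root branch: indent == min_indent
      have hA : pvStepA base_index m stA full[j]
          = (stA.1.insert full[j].1 base_index, [(full[j].2.1, base_index, 0)]) := by
        unfold pvStepA; rw [if_pos hm]
      have hall : ∀ r, r < j → pvInd full j ≤ pvInd full r := by
        intro r hr
        rw [hdr j hjn, hm]
        exact hmlb r (by omega)
      rw [hA, hBroot (fun r hr => not_lt.mpr (hall r hr))]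
      exact hrootInv hall
    · -- A pops the stack
      have hcomp : ((fun t => decide (full[j].2.1 ≤ t.1)) ∘ pvNode (pvInd full) stB.1 stB.2.1)
          = fun q => decide (full[j].2.1 ≤ pvInd full q) := by
        funext q; simp [pvNode]
      have hAstack : stA.2.dropWhile (fun t => decide (full[j].2.1 ≤ t.1))
          = (qs.dropWhile (fun q => decide (full[j].2.1 ≤ pvInd full q))).map
              (pvNode (pvInd full) stB.1 stB.2.1) := by
        rw [hstack, List.dropWhile_map, hcomp]
      cases hQ : qs.dropWhile (fun q => decide (full[j].2.1 ≤ pvInd full q)) with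
      | nil =>
        -- fallback root: every previous entry has indent ≥ current
        have hall : ∀ r, r < j → pvInd full j ≤ pvInd full r := by
          intro r hr
          have hj0 : j ≠ 0 := by omega
          rw [if_neg hj0] at hhead
          obtain ⟨a, ha, hra, hda⟩ :=
            pvCov_dominate (pvInd full) qs hcov (j-1) hhead r (by omega)
          have hle : decide (full[j].2.1 ≤ pvInd full a) = true :=
            List.dropWhile_eq_nil_iff.mp hQ a ha
          rw [← hdr j hjn] at hle
          exact le_trans (of_decide_eq_true hle) hda
        have hA : pvStepA base_index m stA full[j]
            = (stA.1.insert full[j].1 base_index, [(full[j].2.1, base_index, 0)]) := by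
          unfold pvStepA
          rw [if_neg hm, hAstack, hQ]
          rfl
        rw [hA, hBroot (fun r hr => not_lt.mpr (hall r hr))]
        exact hrootInv hall
      | cons q rest =>
        have hj0 : j ≠ 0 := by
          intro h
          rw [h] at hhead
          rw [if_pos rfl] at hhead
          rw [List.head?_eq_none_iff.mp hhead] at hQ
          simp at hQ
        rw [if_neg hj0] at hhead
        have hqmem : q ∈ qs := by
          have hq : q ∈ qs.dropWhile (fun q => decide (full[j].2.1 ≤ pvInd full q)) := by
            rw [hQ]; exact List.mem_cons_self
          exact (List.dropWhile_suffix _).subset hq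
        have hqj : q < j := hqslt q hqmem
        have hdq : pvInd full q < full[j].2.1 := by
          have hf := pvDropWhile_head_false _ qs q rest hQ
          simpa using hf
        have hsplit : qs
            = qs.takeWhile (fun q => decide (full[j].2.1 ≤ pvInd full q)) ++ (q :: rest) := by
          rw [← hQ, List.takeWhile_append_dropWhile]
        have hrestlt : ∀ x ∈ rest, x < q := by
          have hpw : (q :: rest).Pairwise (fun a b => b < a) := by
            rw [← hQ]
            exact (pvCov_pairwise (pvInd full) qs hcov).sublist (List.dropWhile_sublist _)
          exact fun x hx => (List.pairwise_cons.mp hpw).1 x hx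
        -- gap coverage: everything strictly between q and j has indent ≥ current
        have hgap : ∀ r, q < r → r < j → full[j].2.1 ≤ pvInd full r := by
          intro r h1 h2
          obtain ⟨a, ha, hra, hda⟩ :=
            pvCov_dominate (pvInd full) qs hcov (j-1) hhead r (by omega)
          have haT : a ∈ qs.takeWhile (fun q => decide (full[j].2.1 ≤ pvInd full q)) := by
            rcases List.mem_append.mp (by rw [← hsplit]; exact ha) with h | h
            · exact h
            · rcases List.mem_cons.mp h with rfl | h
              · omega
              · exact absurd (hrestlt a h) (by omega)
          exact le_trans (of_decide_eq_true
            (List.mem_takeWhile_imp (p := fun q => decide (full[j].2.1 ≤ pvInd full q)) haT)) hda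
        have hfindq : pvParent (full.map pvPr) j = (q : Int) := by
          have hPq : (fun q' => decide (((full.map pvPr).getD q' (0,0)).2
              < ((full.map pvPr).getD j (0,0)).2)) q = true := by
            rw [decide_eq_true_eq, hEget q (by omega), hEget j hjn]
            show full[q].2.1 < full[j].2.1
            rw [← hdr q (by omega)]
            exact hdq
          have hrest : ∀ r, q < r → r < j → (fun q' => decide (((full.map pvPr).getD q' (0,0)).2
              < ((full.map pvPr).getD j (0,0)).2)) r = false := by
            intro r h1 h2
            rw [decide_eq_false_iff_not, hEget r (by omega), hEget j hjn]
            show ¬ (full[r].2.1 < full[j].2.1)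
            rw [← hdr r (by omega)]
            exact not_lt.mpr (hgap r h1 h2)
          unfold pvParent
          rw [pvFind_revRange_some _ j q hqj hPq hrest]
        have hA : pvStepA base_index m stA full[j]
            = (stA.1.insert full[j].1
                 (stB.1.getD q "" ++ "." ++ PySem.Int.toStr (stB.2.1.getD q 0 + 1)),
               (full[j].2.1, stB.1.getD q "" ++ "." ++ PySem.Int.toStr (stB.2.1.getD q 0 + 1), 0)
                 :: (pvInd full q, stB.1.getD q "", stB.2.1.getD q 0 + 1)
                 :: rest.map (pvNode (pvInd full) stB.1 stB.2.1)) := by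
          unfold pvStepA
          rw [if_neg hm, hAstack, hQ]
          simp only [List.map_cons, pvNode]
        have hB : pvStepB base_index (full.map pvPr)
            ((List.range full.length).map (pvParent (full.map pvPr))) stB j
            = (stB.1 ++ [stB.1.getD q "" ++ "." ++ PySem.Int.toStr (stB.2.1.getD q 0 + 1)],
               stB.2.1.set q (stB.2.1.getD q 0 + 1),
               stB.2.2.insert full[j].1
                 (stB.1.getD q "" ++ "." ++ PySem.Int.toStr (stB.2.1.getD q 0 + 1))) := by
          unfold pvStepB
          rw [hPar, hfindq, if_neg (by norm_num), hEget j hjn]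
          simp only [Int.toNat_natCast]
          rfl
        rw [hA, hB]
        refine ⟨by rw [hout], by simp [hlabLen], by simp [hcntLen], ?_, j :: q :: rest,
          ?_, by simp, ?_, ?_⟩
        · intro r hr
          rw [pvGetD_set_ne _ _ _ _ (by omega)]
          exact hzero r (by omega)
        · simp only [List.map_cons, pvNode, List.cons.injEq, Prod.mk.injEq]
          refine ⟨⟨(hdr j hjn).symm, ?_, ?_⟩, ⟨trivial, ?_, ?_⟩, ?_⟩
          · rw [← hlabLen, pvGetD_concat_len]
          · rw [pvGetD_set_ne _ _ _ _ (by omega)]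
            exact (hzero j le_rfl).symm
          · exact (pvGetD_append_left _ _ _ (by omega)).symm
          · exact (pvGetD_set_self _ _ _ (by rw [hcntLen]; omega)).symm
          · apply List.map_congr_left
            intro x hx
            have hxq : x < q := hrestlt x hx
            simp only [pvNode, Prod.mk.injEq]
            refine ⟨trivial, ?_, ?_⟩
            · exact (pvGetD_append_left _ _ _ (by omega)).symm
            · exact (pvGetD_set_ne _ _ _ _ (by omega)).symm
        · show pvCov (pvInd full) (j :: q :: rest)
          refine ⟨hqj, ?_, ?_, ?_⟩
          · rw [hdr j hjn]; exact hdq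
          · intro r h1 h2
            rw [hdr j hjn]
            exact hgap r h1 h2
          · have hc := pvCov_dropWhile (pvInd full)
              (fun q => decide (full[j].2.1 ≤ pvInd full q)) qs hcov
            rw [hQ] at hc
            exact hc
        · intro x hx
          rcases List.mem_cons.mp hx with rfl | hx
          · omega
          · rcases List.mem_cons.mp hx with rfl | hx
            · omega
            · have := hrestlt x hx; omega

-- ===== VERDICT (by name: the statement is the Claim_ definition above) =====
theorem calculate_flow_indices_v2_spec : Claim_equal_calculate_flow_indices_v2 := by
  intro lines base_index _hdom
  unfold Spec_calculate_flow_indices_v2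
  simp only [calculate_flow_indices_v2, calculate_flow_indices_v2_alt]
  rw [pvEntries_eq]
  by_cases hE : (pvLinesA lines).isEmpty
  · have h0 : pvLinesA lines = [] := by simpa using hE
    rw [h0]
    simp [PySem.Dict.empty]
  · rw [if_neg hE]
    have hne : (pvLinesA lines).map (fun il => il.2.1) ≠ [] := by
      intro h
      rw [List.map_eq_nil_iff] at h
      rw [h] at hE
      simp at hE
    cases hmin : PySem.List.min? ((pvLinesA lines).map (fun il => il.2.1)) (fun x => x) with
    | none => exact absurd ((PySem.List.min?_eq_none_iff _ _).mp hmin) hne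
    | some mv =>
      have Hmin : ∀ e ∈ pvLinesA lines, mv ≤ e.2.1 := by
        intro e he
        have hm := PySem.List.min?_isMin hmin e.2.1 (List.mem_map_of_mem he)
        simpa using hm
      have hmain := pvMain (pvLinesA lines) base_index mv Hmin (pvLinesA lines).length 0
        (by omega) (PySem.Dict.empty, [])
        ([], List.replicate ((pvLinesA lines).map pvPr).length 0, PySem.Dict.empty) ?_
      · simp only [Option.getD_some, List.length_map, List.range_eq_range',
          List.drop_zero] at hmain ⊢
        rw [hmain]
      · refine ⟨rfl, rfl, by simp, ?_, [], rfl, by simp, trivial, by simp⟩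
        intro r _
        simp only [List.getD_eq_getElem?_getD, List.getElem?_replicate]
        split <;> rfl
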